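-- pv_equiv track=rewrite | github.com/EvgeniiMorozov/studying_Python | main/selfedu/basics/practice.py | end_zeros
-- ===== SOURCE A (Python) =====
-- def end_zeros(num: int) -> int:
--     count_zero = 0
--     lst = list(str(num))
--     lst.reverse()
--     for i in lst:
--         if int(i) == 0:
--             count_zero += 1
--         else:
--             break
--     return count_zero
-- ===== SOURCE B (Python) =====
-- def end_zeros(num: int) -> int:
--     s = str(num)
--     return len(s) - len(s.rstrip('0'))
-- ===== Notes on version B (the rewrite author's own statement) =====
-- stated objective: simpler
-- what changed: Replaces the reverse-the-digit-list loop with per-char int() parsing and a counter by a single rstrip('0') and a length difference; no loop, no accumulator, no break.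
import Mathlib
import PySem

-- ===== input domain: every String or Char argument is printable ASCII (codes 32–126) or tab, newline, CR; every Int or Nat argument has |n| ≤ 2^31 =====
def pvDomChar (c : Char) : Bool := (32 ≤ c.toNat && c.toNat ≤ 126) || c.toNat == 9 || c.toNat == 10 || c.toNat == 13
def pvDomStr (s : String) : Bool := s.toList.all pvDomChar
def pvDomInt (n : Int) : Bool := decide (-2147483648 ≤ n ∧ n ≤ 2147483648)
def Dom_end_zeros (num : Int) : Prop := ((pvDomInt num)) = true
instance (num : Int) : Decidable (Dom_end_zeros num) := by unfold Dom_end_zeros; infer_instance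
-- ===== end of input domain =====

-- B replaces A's reverse-and-count loop (with an int() parse per digit) by stripping
-- trailing '0' characters and taking the length difference; objective: simpler.


-- ===== PORT A =====
-- the 'for i in lst: if int(i) == 0: count_zero += 1 else: break' loop;
-- the 'none' (int() ValueError) branch is unreachable on int inputs: str(num) always
-- has a nonzero digit before a possible sign, so the loop breaks before reaching '-'.
def endZerosLoop : List Char → Int → Int
  | [], count_zero => count_zero
  | i :: rest, count_zero =>
    match PySem.Int.ofStr? (String.ofList [i]) with
    | none => count_zero
    | some v => if v = 0 then endZerosLoop rest (count_zero + 1) else count_zero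

def end_zeros (num : Int) : Int :=
  let lst := (PySem.Int.toStr num).toList
  endZerosLoop lst.reverse 0

-- ===== PORT B =====
-- s.rstrip('0') ported by hand (drop trailing '0' chars); exact for this single-char argument.
def end_zeros_alt (num : Int) : Int :=
  let s := (PySem.Int.toStr num).toList
  (s.length : Int) - (((s.reverse.dropWhile (· == '0')).reverse).length : Int)

-- ===== PRECONDITION & SPEC =====
def Spec_end_zeros (num : Int) (out : Int) : Prop := out = end_zeros_alt num
instance (num : Int) (out : Int) : Decidable (Spec_end_zeros num out) := by unfold Spec_end_zeros; infer_instance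

-- ===== CLAIM (what is proved, stated in full; the proofs are below) =====
def Claim_equal_end_zeros : Prop := ∀ (num : Int), Dom_end_zeros num → Spec_end_zeros num (end_zeros num)

-- ===== LEMMAS AND PROOFS =====

-- a char is 'good' if, unless it is '0', int() of it is not 0 (it is a nonzero digit or raises)
def GoodChar (c : Char) : Prop := c ≠ '0' → PySem.Int.ofChars? [c] ≠ some 0

theorem digitChar_ge16 (n : Nat) : Nat.digitChar (n + 16) = '*' := by
  unfold Nat.digitChar
  repeat rw [if_neg (by omega)]

theorem goodChar_digitChar (m : Nat) : GoodChar m.digitChar := by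
  unfold GoodChar
  by_cases h : m < 16
  · interval_cases m <;> decide
  · rw [show m = (m - 16) + 16 by omega, digitChar_ge16]; decide

theorem mem_toDigitsCore (fuel : Nat) : ∀ (n : Nat) (ds : List Char) (c : Char),
    c ∈ Nat.toDigitsCore 10 fuel n ds → c ∈ ds ∨ ∃ m, c = Nat.digitChar m := by
  induction fuel with
  | zero => intro n ds c h; simpa [Nat.toDigitsCore] using Or.inl h
  | succ f ih =>
    intro n ds c h
    rw [Nat.toDigitsCore] at h
    by_cases hz : n / 10 = 0
    · simp only [hz] at h
      rcases List.mem_cons.mp h with h | h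
      · exact Or.inr ⟨n % 10, h⟩
      · exact Or.inl h
    · simp only [hz] at h
      rcases ih (n / 10) (Nat.digitChar (n % 10) :: ds) c h with h | h
      · rcases List.mem_cons.mp h with h | h
        · exact Or.inr ⟨n % 10, h⟩
        · exact Or.inl h
      · exact Or.inr h

theorem goodChar_toChars (num : Int) (c : Char) (hc : c ∈ PySem.Int.toChars num) :
    GoodChar c := by
  unfold PySem.Int.toChars at hc
  have hdig : ∀ (k : Nat), c ∈ Nat.toDigits 10 k → GoodChar c := by
    intro k hk
    rcases mem_toDigitsCore (k + 1) k [] c hk with h | ⟨m, rfl⟩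
    · simp at h
    · exact goodChar_digitChar m
  split_ifs at hc with hneg
  · rcases List.mem_cons.mp hc with rfl | hc
    · unfold GoodChar; decide
    · exact hdig _ hc
  · exact hdig _ hc

theorem endZerosLoop_eq_takeWhile (m : List Char) :
    (∀ c ∈ m, GoodChar c) → ∀ acc : Int,
    endZerosLoop m acc = acc + ((m.takeWhile (· == '0')).length : Int) := by
  induction m with
  | nil => intro _ acc; simp [endZerosLoop]
  | cons c rest ih =>
    intro hgood acc
    by_cases hc : c = '0'
    · subst hc
      have : PySem.Int.ofStr? (String.ofList ['0']) = some 0 := by decide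
      rw [endZerosLoop, this]
      rw [ih (fun d hd => hgood d (List.mem_cons_of_mem _ hd)) (acc + 1)]
      simp [List.takeWhile]
      omega
    · have hne := hgood c (List.mem_cons_self) hc
      have hstr : PySem.Int.ofStr? (String.ofList [c]) = PySem.Int.ofChars? [c] := by
        simp [PySem.Int.ofStr?]
      rw [endZerosLoop, hstr]
      have htk : (c :: rest).takeWhile (· == '0') = [] := by
        simp [hc]
      rw [htk]
      cases hof : PySem.Int.ofChars? [c] with
      | none => simp
      | some v =>
        have hv : v ≠ 0 := by intro h; subst h; exact hne hof
        simp [hv]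

theorem lengths_split (s : List Char) :
    s.length = (s.reverse.takeWhile (· == '0')).length
      + (s.reverse.dropWhile (· == '0')).length := by
  have h := congrArg List.length
    (List.takeWhile_append_dropWhile (p := (· == '0')) (l := s.reverse))
  simp only [List.length_append, List.length_reverse] at h
  omega

-- ===== VERDICT (by name: the statement is the Claim_ definition above) =====
theorem end_zeros_spec : Claim_equal_end_zeros := by
  intro num _
  unfold Spec_end_zeros end_zeros end_zeros_alt
  simp only [PySem.Int.toList_toStr]
  set s := PySem.Int.toChars num with hs
  have hgood : ∀ c ∈ s.reverse, GoodChar c := by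
    intro c hc
    exact goodChar_toChars num c (List.mem_reverse.mp hc)
  rw [endZerosLoop_eq_takeWhile s.reverse hgood 0]
  have := lengths_split s
  simp only [List.length_reverse]
  omega
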